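-- pv_equiv track=rewrite | github.com/llomj/python_app | level1_2000.py | get_words_by_vowel_count
-- ===== SOURCE A (Python) =====
-- def get_words_by_vowel_count(text):
--     vowels = "aeiouAEIOU"
--     words = text.split()
--     result = {}
--     for word in words:
--         count = sum(1 for c in word if c in vowels)
--         if count not in result:
--             result[count] = []
--         result[count].append(word)
--     return result
-- ===== SOURCE B (Python) =====
-- def get_words_by_vowel_count(text):
--     vowels = "aeiouAEIOU"
--     words = text.split()
--     counts = [sum(c in vowels for c in w) for w in words]
--     keys = list(dict.fromkeys(counts))
--     return {k: [w for w, c in zip(words, counts) if c == k] for k in keys}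
-- ===== Notes on version B (the rewrite author's own statement) =====
-- stated objective: alternative
-- what changed: Replaces A's single-pass dict-append loop by precomputing each word's vowel count, deduplicating the counts with dict.fromkeys, and building each group with a per-key filter over the zipped (word, count) pairs.
import Mathlib
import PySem

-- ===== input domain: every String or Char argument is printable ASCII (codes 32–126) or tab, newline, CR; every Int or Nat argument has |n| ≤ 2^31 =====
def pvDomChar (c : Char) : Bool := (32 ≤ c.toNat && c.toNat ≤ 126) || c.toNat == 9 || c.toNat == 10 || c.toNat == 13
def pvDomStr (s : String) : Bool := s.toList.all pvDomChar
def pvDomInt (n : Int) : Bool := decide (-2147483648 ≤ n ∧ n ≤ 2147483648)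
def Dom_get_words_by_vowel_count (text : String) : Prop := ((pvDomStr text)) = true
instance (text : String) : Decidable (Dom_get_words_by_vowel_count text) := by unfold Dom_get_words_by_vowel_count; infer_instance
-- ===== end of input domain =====

-- B replaces A's one-pass dict-append loop by computing the vowel count of each word once,
-- deduplicating the counts (dict.fromkeys) and building each group with a per-key filter
-- over the zipped (word, count) list; same return value, alternative decomposition.

-- ===== PORT A =====
-- Python 'c in vowels' for the single characters of a word is char membership in the vowel string
def get_words_by_vowel_count (text : String) : List (Int × List String) :=
  let vowels := "aeiouAEIOU"
  let words := PySem.Str.split₀ text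
  let result :=
    words.foldl (fun d word =>
      let count : Int :=
        ((word.toList.filter (fun c => vowels.toList.contains c)).map (fun _ => (1 : Int))).sum
      let d := if !d.contains count then d.insert count ([] : List String) else d
      d.modify count [] (fun l => l ++ [word]))   -- result[count].append(word)
      PySem.Dict.empty
  result.items

-- ===== PORT B =====
def get_words_by_vowel_count_alt (text : String) : List (Int × List String) :=
  let vowels := "aeiouAEIOU"
  let words := PySem.Str.split₀ text
  let counts := words.map (fun w =>
    (w.toList.map (fun c => if vowels.toList.contains c then (1 : Int) else 0)).sum)
  let keys := PySem.List.dedup counts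
  keys.map (fun k => (k, ((words.zip counts).filter (fun p => p.2 == k)).map (fun p => p.1)))

-- ===== PRECONDITION & SPEC =====
def Spec_get_words_by_vowel_count (text : String) (out : List (Int × List String)) : Prop := out = get_words_by_vowel_count_alt text
instance (text : String) (out : List (Int × List String)) : Decidable (Spec_get_words_by_vowel_count text out) := by unfold Spec_get_words_by_vowel_count; infer_instance

-- ===== CLAIM (what is proved, stated in full; the proofs are below) =====
def Claim_equal_get_words_by_vowel_count : Prop := ∀ (text : String), Dom_get_words_by_vowel_count text → Spec_get_words_by_vowel_count text (get_words_by_vowel_count text)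

-- ===== LEMMAS AND PROOFS =====

-- the two vowel-count expressions agree (sum of 1 over a filter vs sum of ite 1/0)
theorem pv_count_eq (cs : List Char) (p : Char → Bool) :
    ((cs.filter p).map (fun _ => (1 : Int))).sum
      = (cs.map (fun c => if p c then (1 : Int) else 0)).sum := by
  induction cs with
  | nil => rfl
  | cons c t ih =>
    by_cases h : p c
    · simp only [List.filter_cons, h, if_pos, List.map_cons, List.sum_cons]
      rw [ih]
    · simp only [List.filter_cons, h, if_false, List.map_cons, List.sum_cons, Bool.false_eq_true]
      rw [ih]; ring

-- A's loop body is the same dict as an unconditional modify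
theorem pv_step_eq (d : PySem.Dict Int (List String)) (c : Int) (w : String) :
    (if !d.contains c then d.insert c ([] : List String) else d).modify c [] (fun l => l ++ [w])
      = d.modify c [] (fun l => l ++ [w]) := by
  by_cases h : d.contains c
  · simp [h]
  · simp only [Bool.not_eq_true] at h
    simp only [h, Bool.not_false, if_pos]
    unfold PySem.Dict.modify
    rw [PySem.Dict.insert_insert_self,
        PySem.Dict.getD_insert_self,
        PySem.Dict.getD_of_not_contains d _ h]

-- ===== VERDICT (by name: the statement is the Claim_ definition above) =====
-- B's zipped per-key filter is the plain filter of the words by their vowel count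
theorem pv_zip_filter (words : List String) (vc : String → Int) (k : Int) :
    ((words.zip (words.map vc)).filter (fun p => p.2 == k)).map (fun p => p.1)
      = words.filter (fun w => vc w == k) := by
  induction words with
  | nil => rfl
  | cons w t ih =>
    by_cases h : vc w == k <;> simp only [List.zip_cons_cons, List.map_cons, List.filter_cons, h,
      if_true, if_false, List.map_cons, Bool.false_eq_true, ih]

theorem get_words_by_vowel_count_spec : Claim_equal_get_words_by_vowel_count := by
  unfold Claim_equal_get_words_by_vowel_count
  intro text _
  unfold Spec_get_words_by_vowel_count
  unfold get_words_by_vowel_count get_words_by_vowel_count_alt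
  simp only []
  set words := PySem.Str.split₀ text with hwords
  set vc : String → Int :=
    fun w => ((w.toList.filter (fun c => "aeiouAEIOU".toList.contains c)).map (fun _ => (1 : Int))).sum
    with hvc
  -- B's count equals A's count
  have hcounts :
      (words.map (fun w =>
        (w.toList.map (fun c => if "aeiouAEIOU".toList.contains c then (1 : Int) else 0)).sum))
        = words.map vc := by
    refine List.map_congr_left (fun w _ => ?_)
    rw [hvc]; exact (pv_count_eq w.toList _).symm
  rw [hcounts]
  -- rewrite A's fold into the unconditional modify shape
  have hfold :
      (words.foldl (fun d word =>
        let count : Int :=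
          ((word.toList.filter (fun c => "aeiouAEIOU".toList.contains c)).map (fun _ => (1 : Int))).sum
        let d := if !d.contains count then d.insert count ([] : List String) else d
        d.modify count [] (fun l => l ++ [word])) PySem.Dict.empty)
      = (words.foldl (fun d word => d.modify (vc word) [] (fun l => l ++ [word])) PySem.Dict.empty) := by
    refine PySem.List.foldl_congr_mem words _ _ PySem.Dict.empty ?_
    intro d w _; exact pv_step_eq d (vc w) w
  rw [hfold]
  -- keys of the fold: first occurrences of the counts, in order; keys are nodup
  have hkeys :
      (words.foldl (fun d word => d.modify (vc word) [] (fun l => l ++ [word])) PySem.Dict.empty).keys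
        = PySem.List.dedup (words.map vc) := by
    rw [PySem.List.dedup_eq_ofList]
    exact PySem.Dict.keys_foldl_modify_key words vc [] (fun _ w l => l ++ [w]) PySem.Dict.empty
  have hnodup :
      (words.foldl (fun d word => d.modify (vc word) [] (fun l => l ++ [word])) PySem.Dict.empty).keys.Nodup :=
    PySem.Dict.nodup_keys_foldl_modify_key words vc [] (fun _ w l => l ++ [w]) PySem.Dict.empty
      PySem.Dict.nodup_keys_empty
  rw [PySem.Dict.items_eq_map_keys _ hnodup ([] : List String), hkeys]
  refine List.map_congr_left (fun k _ => ?_)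
  refine Prod.ext rfl ?_
  -- the group at key k, on both sides, is the filter of words by vowel count k
  have hA :
      (words.foldl (fun d word => d.modify (vc word) [] (fun l => l ++ [word])) PySem.Dict.empty).getD k []
        = words.filter (fun w => vc w == k) := by
    have h1 :
        (words.foldl (fun d word => d.modify (vc word) [] (fun l => l ++ [word])) PySem.Dict.empty)
          = ((words.map (fun w => (vc w, w))).foldl
              (fun d p => d.modify p.1 [] (fun l => l ++ [p.2])) PySem.Dict.empty) := by
      rw [List.foldl_map]
    rw [h1, PySem.Dict.getD_foldl_modify_append, List.filter_map, List.map_map]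
    simp [Function.comp_def]
  dsimp only
  rw [hA, pv_zip_filter words vc k]
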